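-- pv_equiv track=rewrite | github.com/bps24/SMIF-Interview-Questions | Question 3/Logic Question.py | calc_sum
-- ===== SOURCE A (Python) =====
-- def calc_sum(lst, start, end, factor):
--
--     #instantiate boolean variables to keep track of when indices should be multiplied
--     occur=False
--     mult=False
--     count=0
--
--     #iterate through every entry
--     for num in lst:
--
--         #change booleans when the start number first appears
--         if num==start and not occur:
--             mult=True
--             occur=True
--
--         #add the entry to a running count
--         if mult:
--             count+=num*factor
--         else:
--             count+=num
--
--         #change back the booleans once the end number appears
--         if num==end and occur and mult:
--             mult=False
--
--     #if end number never appears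
--     if mult:
--         return sum(lst)
--
--     return count
-- ===== SOURCE B (Python) =====
-- def calc_sum(lst, start, end, factor):
--     # locate the multiplied window up front instead of tracking boolean state
--     try:
--         i = lst.index(start)
--         j = lst.index(end, i)
--     except ValueError:
--         return sum(lst)
--     return sum(lst[:i]) + factor * sum(lst[i:j + 1]) + sum(lst[j + 1:])
-- ===== Notes on version B (the rewrite author's own statement) =====
-- stated objective: simpler
-- what changed: Replaces the occur/mult boolean state machine with a direct computation: find the first index of start and the first index of end at or after it (falling back to sum(lst) when either is missing), then return the three slice sums with the middle slice scaled by factor.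
import Mathlib
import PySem

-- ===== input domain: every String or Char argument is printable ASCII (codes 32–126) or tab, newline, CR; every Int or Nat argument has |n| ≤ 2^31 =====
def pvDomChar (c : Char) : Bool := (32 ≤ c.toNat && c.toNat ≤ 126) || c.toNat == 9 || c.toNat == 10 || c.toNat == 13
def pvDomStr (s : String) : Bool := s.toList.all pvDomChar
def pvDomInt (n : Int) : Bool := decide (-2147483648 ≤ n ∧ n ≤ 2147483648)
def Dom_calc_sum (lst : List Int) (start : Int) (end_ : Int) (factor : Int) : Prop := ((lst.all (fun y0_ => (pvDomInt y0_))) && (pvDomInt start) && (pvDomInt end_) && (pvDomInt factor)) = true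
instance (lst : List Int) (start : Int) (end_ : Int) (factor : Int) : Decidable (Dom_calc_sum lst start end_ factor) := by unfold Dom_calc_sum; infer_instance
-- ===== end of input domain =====

-- B replaces A's occur/mult boolean state machine by locating the start/end indices
-- first and summing three slices (objective: simpler). Return values only; no mutation.

-- ===== PORT A =====
-- one iteration of A's for-loop over state (occur, mult, count)
def calcSumStep (start end_ factor : Int) (st : Bool × Bool × Int) (num : Int) :
    Bool × Bool × Int :=
  let p1 : Bool × Bool := if num == start && !st.1 then (true, true) else (st.1, st.2.1)
  let count : Int := if p1.2 then st.2.2 + num * factor else st.2.2 + num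
  let mult : Bool := if num == end_ && p1.1 && p1.2 then false else p1.2
  (p1.1, mult, count)

def calc_sum (lst : List Int) (start : Int) (end_ : Int) (factor : Int) : Int :=
  let st := lst.foldl (calcSumStep start end_ factor) (false, false, 0)
  if st.2.1 then lst.sum else st.2.2

-- ===== PORT B =====
-- lst.index(start) → PySem.List.index?; lst.index(end, i) searches from position i:
-- ported as index? on lst.drop i (absolute index is i + d).  Slice sums with
-- nonnegative in-range bounds are exactly drop/take.
def calc_sum_alt (lst : List Int) (start : Int) (end_ : Int) (factor : Int) : Int :=
  match PySem.List.index? lst start with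
  | none => lst.sum
  | some i =>
    match PySem.List.index? (lst.drop i) end_ with
    | none => lst.sum
    | some d =>
      (lst.take i).sum + factor * ((lst.drop i).take (d + 1)).sum
        + (lst.drop (i + d + 1)).sum

-- ===== PRECONDITION & SPEC =====
def Spec_calc_sum (lst : List Int) (start : Int) (end_ : Int) (factor : Int) (out : Int) : Prop := out = calc_sum_alt lst start end_ factor
instance (lst : List Int) (start : Int) (end_ : Int) (factor : Int) (out : Int) : Decidable (Spec_calc_sum lst start end_ factor out) := by unfold Spec_calc_sum; infer_instance

-- ===== CLAIM (what is proved, stated in full; the proofs are below) =====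
def Claim_equal_calc_sum : Prop := ∀ (lst : List Int) (start : Int) (end_ : Int) (factor : Int), Dom_calc_sum lst start end_ factor → Spec_calc_sum lst start end_ factor (calc_sum lst start end_ factor)

-- ===== LEMMAS AND PROOFS =====

-- one-step reductions of A's loop body in each phase
theorem step_done (start end_ factor num c : Int) :
    calcSumStep start end_ factor (true, false, c) num = (true, false, c + num) := by
  simp [calcSumStep]

theorem step_mult_end (start end_ factor c : Int) :
    calcSumStep start end_ factor (true, true, c) end_ = (true, false, c + end_ * factor) := by
  simp [calcSumStep]

theorem step_mult_ne (start end_ factor num c : Int) (h : num ≠ end_) :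
    calcSumStep start end_ factor (true, true, c) num = (true, true, c + num * factor) := by
  simp [calcSumStep, h]

theorem step_idle_start (start end_ factor c : Int) :
    calcSumStep start end_ factor (false, false, c) start =
      (true, (if start == end_ then false else true), c + start * factor) := by
  by_cases h : start = end_ <;> simp [calcSumStep, h]

theorem step_idle_ne (start end_ factor num c : Int) (h : num ≠ start) :
    calcSumStep start end_ factor (false, false, c) num = (false, false, c + num) := by
  simp [calcSumStep, h]

-- after the end marker was seen: every remaining element is added plainly
theorem calcSum_phase2 (start end_ factor : Int) (xs : List Int) (c : Int) :
    xs.foldl (calcSumStep start end_ factor) (true, false, c) = (true, false, c + xs.sum) := by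
  induction xs generalizing c with
  | nil => simp
  | cons y ys ih =>
    rw [List.foldl_cons, step_done, ih]
    simp; ring_nf

-- inside the multiplied window: scale until the first occurrence of end_
theorem calcSum_phase1 (start end_ factor : Int) (xs : List Int) (c : Int) :
    xs.foldl (calcSumStep start end_ factor) (true, true, c) =
      match PySem.List.index? xs end_ with
      | none => (true, true, c + factor * xs.sum)
      | some k => (true, false,
          c + factor * (xs.take (k + 1)).sum + (xs.drop (k + 1)).sum) := by
  induction xs generalizing c with
  | nil => simp [PySem.List.index?]
  | cons y ys ih =>
    by_cases hy : y = end_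
    · subst hy
      rw [PySem.List.index?_cons_self, List.foldl_cons, step_mult_end, calcSum_phase2]
      simp; ring_nf
    · rw [PySem.List.index?_cons_of_ne _ hy, List.foldl_cons,
        step_mult_ne _ _ _ _ _ hy, ih]
      cases hk : PySem.List.index? ys end_ with
      | none => simp; ring_nf
      | some k =>
        simp only [Option.map_some, List.take_succ_cons, List.sum_cons, List.drop_succ_cons]
        simp; ring_nf

-- full characterisation of A's fold from the initial state
theorem calcSum_phase0 (start end_ factor : Int) (xs : List Int) (c : Int) :
    xs.foldl (calcSumStep start end_ factor) (false, false, c) =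
      match PySem.List.index? xs start with
      | none => (false, false, c + xs.sum)
      | some i =>
        match PySem.List.index? (xs.drop i) end_ with
        | none => (true, true, c + (xs.take i).sum + factor * (xs.drop i).sum)
        | some d => (true, false,
            c + (xs.take i).sum + factor * ((xs.drop i).take (d + 1)).sum
              + (xs.drop (i + d + 1)).sum) := by
  induction xs generalizing c with
  | nil => simp [PySem.List.index?]
  | cons x xs ih =>
    by_cases hx : x = start
    · subst hx
      rw [PySem.List.index?_cons_self, List.foldl_cons, step_idle_start]
      simp only [List.drop_zero]
      by_cases he : x = end_
      · subst he
        rw [if_pos (by simp), calcSum_phase2, PySem.List.index?_cons_self]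
        simp; ring_nf
      · rw [if_neg (by simp [he]), calcSum_phase1,
          PySem.List.index?_cons_of_ne _ he]
        cases hk : PySem.List.index? xs end_ with
        | none => simp; ring_nf
        | some k =>
          simp only [Option.map_some, List.take_succ_cons, List.sum_cons, List.drop_succ_cons]
          simp; ring_nf
    · rw [PySem.List.index?_cons_of_ne _ hx, List.foldl_cons,
        step_idle_ne _ _ _ _ _ hx, ih]
      cases hi : PySem.List.index? xs start with
      | none => simp; ring_nf
      | some i =>
        simp only [Option.map_some, List.drop_succ_cons, List.take_succ_cons, List.sum_cons]
        cases hd : PySem.List.index? (xs.drop i) end_ with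
        | none => simp; ring_nf
        | some d => simp; ring_nf

-- ===== VERDICT (by name: the statement is the Claim_ definition above) =====
theorem calc_sum_spec : Claim_equal_calc_sum := by
  intro lst start end_ factor _
  show calc_sum lst start end_ factor = calc_sum_alt lst start end_ factor
  unfold calc_sum calc_sum_alt
  rw [calcSum_phase0]
  cases hi : PySem.List.index? lst start with
  | none => simp
  | some i =>
    simp only
    cases hd : PySem.List.index? (lst.drop i) end_ with
    | none => simp
    | some d => simp
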